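-- pv_equiv track=rewrite | github.com/jcolinpatrick/kryptos | scripts/e_s_122_berlin_clock_perm.py | lamps_to_selection_mask
-- ===== SOURCE A (Python) =====
-- def lamps_to_selection_mask(lamps, length):
--     """Use lamps as a selection mask: extract chars at lit positions, then unlit.
--
--     Different from permutation — this reorders based on cyclic lamp pattern.
--     """
--     lit_chars = []
--     unlit_chars = []
--     for i in range(length):
--         if lamps[i % len(lamps)]:
--             lit_chars.append(i)
--         else:
--             unlit_chars.append(i)
--     return lit_chars + unlit_chars
-- ===== SOURCE B (Python) =====
-- def lamps_to_selection_mask(lamps, length):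
--     """Stable sort of the index range by the (negated) cyclic lamp mask:
--
--     lit positions (key False) come first, unlit (key True) after, each group
--     in ascending index order thanks to sort stability.
--     """
--     return sorted(range(length), key=lambda i: not lamps[i % len(lamps)])
-- ===== Notes on version B (the rewrite author's own statement) =====
-- stated objective: idiomatic
-- what changed: Replaced the two-accumulator partition loop with a single stable sort of range(length) keyed by the negated cyclic lamp mask; stability keeps each group in ascending index order.
import Mathlib
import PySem

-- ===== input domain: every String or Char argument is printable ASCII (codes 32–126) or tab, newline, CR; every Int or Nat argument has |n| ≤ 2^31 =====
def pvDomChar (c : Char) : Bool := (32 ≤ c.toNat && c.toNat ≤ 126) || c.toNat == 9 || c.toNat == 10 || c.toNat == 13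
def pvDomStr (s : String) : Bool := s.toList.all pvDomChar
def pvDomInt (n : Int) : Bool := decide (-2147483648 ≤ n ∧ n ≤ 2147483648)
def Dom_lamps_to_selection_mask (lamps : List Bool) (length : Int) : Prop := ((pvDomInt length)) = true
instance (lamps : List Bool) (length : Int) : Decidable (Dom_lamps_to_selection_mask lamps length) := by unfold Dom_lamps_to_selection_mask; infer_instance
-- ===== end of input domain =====

-- B replaces A's two-accumulator partition loop with one stable sort of the index
-- range keyed by the negated cyclic lamp mask (idiomatic; same return value).

-- ===== PORT A =====
-- lamps[i % len(lamps)]; total via getD, exact whenever lamps ≠ [] (guaranteed by Pre_ when the loop runs)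
def pvLampAt (lamps : List Bool) (i : Int) : Bool :=
  (PySem.List.pyGet? lamps (PySem.Int.mod i (lamps.length : Int))).getD false

def lamps_to_selection_mask (lamps : List Bool) (length : Int) : List Int :=
  let p := (PySem.List.pyRange 0 length 1).foldl
    (fun (acc : List Int × List Int) i =>
      if pvLampAt lamps i then (acc.1 ++ [i], acc.2) else (acc.1, acc.2 ++ [i]))
    ([], [])
  p.1 ++ p.2

-- ===== PORT B =====
def lamps_to_selection_mask_alt (lamps : List Bool) (length : Int) : List Int :=
  PySem.List.sorted (PySem.List.pyRange 0 length 1) (fun i => !(pvLampAt lamps i)) false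

-- ===== PRECONDITION & SPEC =====
-- Pre_ excludes exactly the inputs where Python A raises ZeroDivisionError
-- (lamps empty while the loop runs at least once); B raises there too.
def Pre_lamps_to_selection_mask (lamps : List Bool) (length : Int) : Prop :=
  lamps ≠ [] ∨ length ≤ 0
instance (lamps : List Bool) (length : Int) : Decidable (Pre_lamps_to_selection_mask lamps length) := by
  unfold Pre_lamps_to_selection_mask; infer_instance

def pvWitness_lamps_to_selection_mask : List Bool × Int := ([true, false], 5)

def Spec_lamps_to_selection_mask (lamps : List Bool) (length : Int) (out : List Int) : Prop := out = lamps_to_selection_mask_alt lamps length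
instance (lamps : List Bool) (length : Int) (out : List Int) : Decidable (Spec_lamps_to_selection_mask lamps length out) := by unfold Spec_lamps_to_selection_mask; infer_instance

-- ===== CLAIM (what is proved, stated in full; the proofs are below) =====
def Claim_equal_lamps_to_selection_mask : Prop := ∀ (lamps : List Bool) (length : Int), Dom_lamps_to_selection_mask lamps length → Pre_lamps_to_selection_mask lamps length → Spec_lamps_to_selection_mask lamps length (lamps_to_selection_mask lamps length)

-- ===== LEMMAS AND PROOFS =====

-- inserting x between a prefix it does not go before and a suffix it goes before
theorem pv_insertBy_append {α : Type} (bef : α → α → Bool) (x : α) :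
    ∀ (as bs : List α), (∀ a ∈ as, bef x a = false) → (∀ b ∈ bs, bef x b = true) →
    PySem.List.insertBy bef x (as ++ bs) = as ++ x :: bs := by
  intro as
  induction as with
  | nil =>
    intro bs _ h2
    cases bs with
    | nil => simp [PySem.List.insertBy]
    | cons b bs' => simp [PySem.List.insertBy, h2 b (by simp)]
  | cons a as' ih =>
    intro bs h1 h2
    have ha : bef x a = false := h1 a (by simp)
    simp [PySem.List.insertBy, ha, ih bs (fun y hy => h1 y (by simp [hy])) h2]

-- the insertion-sort fold with a Bool key partitions: falses first, trues after, both stable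
theorem pv_foldl_insertBy_split {α : Type} (key : α → Bool) :
    ∀ (l as bs : List α), (∀ a ∈ as, key a = false) → (∀ b ∈ bs, key b = true) →
    l.foldl (fun acc x => PySem.List.insertBy (fun a b => decide (key a < key b)) x acc) (as ++ bs)
      = as ++ l.filter (fun x => !key x) ++ (bs ++ l.filter key) := by
  intro l
  induction l with
  | nil => intro as bs _ _; simp
  | cons x l' ih =>
    intro as bs h1 h2
    by_cases hx : key x = true
    · have hins : PySem.List.insertBy (fun a b => decide (key a < key b)) x (as ++ bs)
          = (as ++ bs) ++ [x] := by
        apply PySem.List.insertBy_of_forall_not_before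
        intro y _; simp [hx]
      have := ih as (bs ++ [x]) h1 (by intro b hb; rcases List.mem_append.1 hb with h | h
                                       · exact h2 b h
                                       · simp at h; simpa [h] using hx)
      simp only [List.foldl_cons, hins, List.append_assoc] at this ⊢
      rw [this]
      simp [hx]
    · have hx' : key x = false := by simpa using hx
      have hins : PySem.List.insertBy (fun a b => decide (key a < key b)) x (as ++ bs)
          = as ++ x :: bs := by
        apply pv_insertBy_append
        · intro a ha; simp [hx', h1 a ha]
        · intro b hb; simp [hx', h2 b hb]
      have := ih (as ++ [x]) bs (by intro a ha; rcases List.mem_append.1 ha with h | h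
                                    · exact h1 a h
                                    · simp at h; simpa [h] using hx') h2
      simp only [List.foldl_cons, hins]
      have hcons : as ++ x :: bs = (as ++ [x]) ++ bs := by simp
      rw [hcons, this]
      simp [hx']

-- stable sort by a Bool key is the partition
theorem pv_sorted_bool_key {α : Type} (l : List α) (key : α → Bool) :
    PySem.List.sorted l key false = l.filter (fun x => !key x) ++ l.filter key := by
  rw [PySem.List.sorted_eq_foldl_insertBy]
  simpa using pv_foldl_insertBy_split key l [] [] (by simp) (by simp)

-- A's pair-accumulator fold collects the two filters
theorem pv_foldA {α : Type} (g : α → Bool) :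
    ∀ (l : List α) (as bs : List α),
    l.foldl (fun (acc : List α × List α) i =>
        if g i then (acc.1 ++ [i], acc.2) else (acc.1, acc.2 ++ [i])) (as, bs)
      = (as ++ l.filter g, bs ++ l.filter (fun x => !g x)) := by
  intro l
  induction l with
  | nil => intro as bs; simp
  | cons x l' ih =>
    intro as bs
    by_cases hx : g x = true
    · simp [List.foldl_cons, hx, ih]
    · have hx' : g x = false := by simpa using hx
      simp [List.foldl_cons, hx', ih]

-- ===== VERDICT (by name: the statement is the Claim_ definition above) =====
theorem lamps_to_selection_mask_spec : Claim_equal_lamps_to_selection_mask := by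
  intro lamps length _ _
  unfold Spec_lamps_to_selection_mask lamps_to_selection_mask lamps_to_selection_mask_alt
  rw [pv_sorted_bool_key]
  rw [pv_foldA (pvLampAt lamps) (PySem.List.pyRange 0 length 1) [] []]
  simp
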